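-- pv_equiv track=rewrite | github.com/e-apostolov/SoftUni_Fundamentals | 08062023_Advanced_List_Ex/take_skip_rope.py | list_decoder
-- ===== SOURCE A (Python) =====
-- def list_decoder(some_letters, some_numbers):
--     some_letters = "".join(some_letters)
--     take_string = []
--     for element_index in range(len(some_numbers)):
--         if element_index % 2 == 0:
--             if some_letters[:some_numbers[element_index]] != "":
--                 take_string.append(some_letters[:some_numbers[element_index]])
--             some_letters = some_letters[some_numbers[element_index]:]
--         else:
--             some_letters = some_letters[some_numbers[element_index]:]
--     return "".join(take_string)
-- ===== SOURCE B (Python) =====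
-- def list_decoder(some_letters, some_numbers):
--     s = "".join(some_letters)
--     L = len(s)
--     i = 0
--     pieces = []
--     for idx, n in enumerate(some_numbers):
--         j = min(i + n, L) if n >= 0 else max(i, L + n)
--         if idx % 2 == 0 and j > i:
--             pieces.append(s[i:j])
--         i = j
--     return "".join(pieces)
-- ===== Notes on version B (the rewrite author's own statement) =====
-- stated objective: alternative
-- what changed: Instead of re-slicing and reassigning the remaining string on every count (copying the tail each iteration), B keeps one integer pointer into the string joined once, computes each new pointer with min/max arithmetic mirroring Python's slice clamping, and slices each kept piece directly out of the original string.
import Mathlib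
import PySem

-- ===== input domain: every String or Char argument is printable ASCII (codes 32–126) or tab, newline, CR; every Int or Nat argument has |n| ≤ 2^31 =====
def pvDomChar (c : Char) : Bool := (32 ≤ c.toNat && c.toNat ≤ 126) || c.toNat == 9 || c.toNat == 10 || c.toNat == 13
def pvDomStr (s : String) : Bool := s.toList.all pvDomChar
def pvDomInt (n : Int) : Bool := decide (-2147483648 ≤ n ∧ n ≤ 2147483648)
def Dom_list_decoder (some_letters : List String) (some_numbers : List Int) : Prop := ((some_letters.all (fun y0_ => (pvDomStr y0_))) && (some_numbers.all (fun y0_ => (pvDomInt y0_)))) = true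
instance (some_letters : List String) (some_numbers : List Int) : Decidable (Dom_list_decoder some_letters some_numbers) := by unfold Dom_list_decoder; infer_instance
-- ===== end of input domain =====

-- B replaces A's repeated re-slicing of the remaining string by a single integer
-- pointer into the joined string, slicing each kept piece directly (alternative algorithm).

-- ===== PORT A =====
-- loop body of A: state = (remaining string as chars, list of taken pieces)
def pvAStep (nums : List Int) (st : List Char × List (List Char)) (i : Int) : List Char × List (List Char) :=
  let n := PySem.List.pyGetD nums i 0
  if PySem.Int.mod i 2 == 0 then
    let taken := PySem.List.slice st.1 none (some n)
    let acc' := if taken ≠ [] then st.2 ++ [taken] else st.2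
    (PySem.List.slice st.1 (some n) none, acc')
  else
    (PySem.List.slice st.1 (some n) none, st.2)

def list_decoder (some_letters : List String) (some_numbers : List Int) : String :=
  let s0 : List Char := PySem.Chars.join [] (some_letters.map String.toList)
  let r := (PySem.List.pyRange 0 (PySem.List.len some_numbers) 1).foldl (pvAStep some_numbers) (s0, [])
  String.ofList (PySem.Chars.join [] r.2)

-- ===== PORT B =====
-- loop body of B: state = (pointer into s, list of taken pieces); p = (idx, n)
def pvBStep (s : List Char) (st : Int × List (List Char)) (p : Int × Int) : Int × List (List Char) :=
  let i := st.1
  let n := p.2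
  let j := if 0 ≤ n then min (i + n) ((s.length : Int)) else max i ((s.length : Int) + n)
  if PySem.Int.mod p.1 2 == 0 && decide (i < j) then
    (j, st.2 ++ [PySem.List.slice s (some i) (some j)])
  else
    (j, st.2)

def list_decoder_alt (some_letters : List String) (some_numbers : List Int) : String :=
  let s : List Char := PySem.Chars.join [] (some_letters.map String.toList)
  let r := (PySem.List.enumerate some_numbers 0).foldl (pvBStep s) (0, [])
  String.ofList (PySem.Chars.join [] r.2)

-- ===== PRECONDITION & SPEC =====
def Spec_list_decoder (some_letters : List String) (some_numbers : List Int) (out : String) : Prop := out = list_decoder_alt some_letters some_numbers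
instance (some_letters : List String) (some_numbers : List Int) (out : String) : Decidable (Spec_list_decoder some_letters some_numbers out) := by unfold Spec_list_decoder; infer_instance

-- ===== CLAIM (what is proved, stated in full; the proofs are below) =====
def Claim_equal_list_decoder : Prop := ∀ (some_letters : List String) (some_numbers : List Int), Dom_list_decoder some_letters some_numbers → Spec_list_decoder some_letters some_numbers (list_decoder some_letters some_numbers)

-- ===== LEMMAS AND PROOFS =====

-- B's next pointer, written out
def pvNext (L i n : Int) : Int := if 0 ≤ n then min (i + n) L else max i (L + n)

theorem pvBStep_eq (s : List Char) (i : Int) (acc : List (List Char)) (k n : Int) :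
    pvBStep s (i, acc) (k, n)
      = (pvNext (s.length : Int) i n,
         if PySem.Int.mod k 2 == 0 && decide (i < pvNext (s.length : Int) i n)
           then acc ++ [PySem.List.slice s (some i) (some (pvNext (s.length : Int) i n))]
           else acc) := by
  simp only [pvBStep, pvNext]
  split <;> split <;> rfl

theorem pvNext_bounds (s : List Char) (i n : Int) (h0 : 0 ≤ i) (hL : i ≤ (s.length : Int)) :
    0 ≤ pvNext (s.length : Int) i n ∧ pvNext (s.length : Int) i n ≤ (s.length : Int) := by
  unfold pvNext; split <;> omega

-- A's skip of n characters from the remainder is a move of the pointer to pvNext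
theorem pvDrop_eq (s : List Char) (i n : Int) (h0 : 0 ≤ i) (hL : i ≤ (s.length : Int)) :
    PySem.List.slice (s.drop i.toNat) (some n) none
      = s.drop (pvNext (s.length : Int) i n).toNat := by
  by_cases hpos : 0 ≤ n
  · rw [PySem.List.slice_from _ hpos, List.drop_drop]
    simp only [pvNext, hpos, if_true]
    by_cases h : i + n ≤ (s.length : Int)
    · congr 1; omega
    · rw [List.drop_eq_nil_iff.2 (by omega), Eq.comm, List.drop_eq_nil_iff]; omega
  · set kk : Nat := (-n).toNat with hkk
    have hnk : n = -(kk : Int) := by omega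
    rw [PySem.List.slice_some_none, hnk, PySem.List.clampIdx_neg_natCast _ _ (by omega),
      List.drop_drop]
    simp only [pvNext, ← hnk, List.length_drop]
    rw [if_neg hpos]
    congr 1
    omega

-- A's taken prefix of the remainder is the direct slice s[i:pvNext]
theorem pvTake_eq (s : List Char) (i n : Int) (h0 : 0 ≤ i) (hL : i ≤ (s.length : Int)) :
    PySem.List.slice (s.drop i.toNat) none (some n)
      = PySem.List.slice s (some i) (some (pvNext (s.length : Int) i n)) := by
  by_cases hpos : 0 ≤ n
  · rw [PySem.List.slice_to _ hpos,
      PySem.List.slice_toNat _ h0 (pvNext_bounds s i n h0 hL).1]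
    simp only [pvNext, hpos, if_true]
    by_cases h : i + n ≤ (s.length : Int)
    · congr 1; omega
    · rw [List.take_of_length_le (by simp; omega), List.take_of_length_le (by simp; omega)]
  · set kk : Nat := (-n).toNat with hkk
    have hnk : n = -(kk : Int) := by omega
    rw [PySem.List.slice_toNat _ h0 (pvNext_bounds s i n h0 hL).1, hnk,
      PySem.List.slice_to_neg_natCast _ _ (by omega)]
    simp only [pvNext, ← hnk, List.length_drop]
    rw [if_neg hpos]
    congr 1
    omega

-- the taken prefix is nonempty exactly when the pointer moves
theorem pvTake_ne_nil_iff (s : List Char) (i n : Int) (h0 : 0 ≤ i) (hL : i ≤ (s.length : Int)) :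
    (PySem.List.slice (s.drop i.toNat) none (some n) ≠ [])
      ↔ i < pvNext (s.length : Int) i n := by
  by_cases hpos : 0 ≤ n
  · rw [PySem.List.slice_to _ hpos]
    simp only [pvNext, hpos, if_true, ne_eq, List.take_eq_nil_iff, List.drop_eq_nil_iff, not_or]
    omega
  · set kk : Nat := (-n).toNat with hkk
    have hnk : n = -(kk : Int) := by omega
    rw [hnk, PySem.List.slice_to_neg_natCast _ _ (by omega)]
    simp only [pvNext, ← hnk, hpos, if_false, ne_eq, List.take_eq_nil_iff,
      List.drop_eq_nil_iff, not_or, List.length_drop]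
    omega

-- one step: A's state (s.drop i.toNat, acc) corresponds to B's state (i, acc)
theorem pvStep_eq (s : List Char) (nums : List Int) (k i : Int) (acc : List (List Char))
    (h0 : 0 ≤ i) (hL : i ≤ (s.length : Int)) :
    pvAStep nums (s.drop i.toNat, acc) k
      = (s.drop (pvBStep s (i, acc) (k, PySem.List.pyGetD nums k 0)).1.toNat,
         (pvBStep s (i, acc) (k, PySem.List.pyGetD nums k 0)).2) := by
  set n := PySem.List.pyGetD nums k 0 with hn
  rw [pvBStep_eq]
  simp only [pvAStep, ← hn]
  rw [pvDrop_eq s i n h0 hL, pvTake_eq s i n h0 hL]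
  set j := pvNext (s.length : Int) i n with hj
  have hne : (PySem.List.slice s (some i) (some j) ≠ []) ↔ i < j := by
    rw [← pvTake_eq s i n h0 hL]
    exact pvTake_ne_nil_iff s i n h0 hL
  by_cases hpar : PySem.Int.mod k 2 == 0
  · simp only [hpar, if_true, Bool.true_and]
    by_cases hlt : i < j <;> simp [hne, hlt]
  · have hdvd : ¬ (2 ∣ k) := by
      rw [← PySem.Int.mod_eq_zero_iff_dvd]
      simpa using hpar
    simp [hdvd]

-- the whole fold keeps the correspondence
theorem pvFold_eq (s : List Char) (nums : List Int) :
    ∀ (l : List Int) (i : Int) (acc : List (List Char)),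
      0 ≤ i → i ≤ (s.length : Int) →
      l.foldl (pvAStep nums) (s.drop i.toNat, acc)
        = (s.drop (l.foldl (fun st k => pvBStep s st (k, PySem.List.pyGetD nums k 0)) (i, acc)).1.toNat,
           (l.foldl (fun st k => pvBStep s st (k, PySem.List.pyGetD nums k 0)) (i, acc)).2)
      ∧ 0 ≤ (l.foldl (fun st k => pvBStep s st (k, PySem.List.pyGetD nums k 0)) (i, acc)).1
      ∧ (l.foldl (fun st k => pvBStep s st (k, PySem.List.pyGetD nums k 0)) (i, acc)).1 ≤ (s.length : Int) := by
  intro l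
  induction l with
  | nil => intro i acc h0 hL; exact ⟨rfl, h0, hL⟩
  | cons k t ih =>
    intro i acc h0 hL
    have hst := pvStep_eq s nums k i acc h0 hL
    have hb := pvNext_bounds s i (PySem.List.pyGetD nums k 0) h0 hL
    have h1 : 0 ≤ (pvBStep s (i, acc) (k, PySem.List.pyGetD nums k 0)).1 := by
      rw [pvBStep_eq]; exact hb.1
    have h2 : (pvBStep s (i, acc) (k, PySem.List.pyGetD nums k 0)).1 ≤ (s.length : Int) := by
      rw [pvBStep_eq]; exact hb.2
    simp only [List.foldl_cons, hst]
    simpa using ih (pvBStep s (i, acc) (k, PySem.List.pyGetD nums k 0)).1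
      (pvBStep s (i, acc) (k, PySem.List.pyGetD nums k 0)).2 h1 h2

-- ===== VERDICT (by name: the statement is the Claim_ definition above) =====
theorem list_decoder_spec : Claim_equal_list_decoder := by
  intro some_letters some_numbers _
  unfold Spec_list_decoder
  simp only [list_decoder, list_decoder_alt]
  rw [PySem.List.enumerate_eq_map_pyRange some_numbers 0, List.foldl_map]
  have h := (pvFold_eq (PySem.Chars.join [] (some_letters.map String.toList)) some_numbers
      (PySem.List.pyRange 0 (PySem.List.len some_numbers) 1) 0 [] le_rfl (by positivity)).1
  simp only [Int.toNat_zero, List.drop_zero] at h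
  rw [h]
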